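-- pv_equiv track=rewrite | github.com/danhicks853/theappapp | backend/services/pr_description_generator.py | _list_changes
-- ===== SOURCE A (Python) =====
-- from typing import Optional, List, Any
--
-- def _list_changes(
--
--     diff: str,
--     files_changed: Optional[List[str]]
-- ) -> List[str]:
--     """List key changes."""
--     changes = []
--
--     if not files_changed:
--         return ["Code updates"]
--
--     # Group by type
--     backend_files = [f for f in files_changed if "backend/" in f]
--     frontend_files = [f for f in files_changed if "frontend/" in f]
--     test_files = [f for f in files_changed if "test" in f.lower()]
--     doc_files = [f for f in files_changed if f.endswith(('.md', '.rst'))]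
--
--     if backend_files:
--         changes.append(f"Backend changes in {len(backend_files)} file(s)")
--     if frontend_files:
--         changes.append(f"Frontend changes in {len(frontend_files)} file(s)")
--     if test_files:
--         changes.append(f"Test updates in {len(test_files)} file(s)")
--     if doc_files:
--         changes.append(f"Documentation updates")
--
--     return changes or ["Code updates"]
-- ===== SOURCE B (Python) =====
-- def _tags(f):
--     """Category tags a single file belongs to (a file may carry several)."""
--     t = []
--     if "backend/" in f:
--         t.append("backend")
--     if "frontend/" in f:
--         t.append("frontend")
--     if "test" in f.lower():
--         t.append("test")
--     if f.endswith((".md", ".rst")):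
--         t.append("doc")
--     return t
--
--
-- _TABLE = [
--     ("backend", "Backend changes in {} file(s)"),
--     ("frontend", "Frontend changes in {} file(s)"),
--     ("test", "Test updates in {} file(s)"),
-- ]
--
--
-- def _list_changes(diff, files_changed):
--     """List key changes: tag each file, tally tags in a dict, emit from a table."""
--     if not files_changed:
--         return ["Code updates"]
--     counts = {}
--     for f in files_changed:
--         for tag in _tags(f):
--             counts[tag] = counts.get(tag, 0) + 1
--     changes = []
--     for tag, fmt in _TABLE:
--         if tag in counts:
--             changes.append(fmt.format(counts[tag]))
--     if "doc" in counts: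
--         changes.append("Documentation updates")
--     return changes or ["Code updates"]
-- ===== Notes on version B (the rewrite author's own statement) =====
-- stated objective: alternative
-- what changed: Instead of four per-category filtering comprehensions, B classifies each file once into category tags, tallies the tags in a dict in a single pass, and generates the messages from a static (tag, format) table driven by dict membership.
import Mathlib
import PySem

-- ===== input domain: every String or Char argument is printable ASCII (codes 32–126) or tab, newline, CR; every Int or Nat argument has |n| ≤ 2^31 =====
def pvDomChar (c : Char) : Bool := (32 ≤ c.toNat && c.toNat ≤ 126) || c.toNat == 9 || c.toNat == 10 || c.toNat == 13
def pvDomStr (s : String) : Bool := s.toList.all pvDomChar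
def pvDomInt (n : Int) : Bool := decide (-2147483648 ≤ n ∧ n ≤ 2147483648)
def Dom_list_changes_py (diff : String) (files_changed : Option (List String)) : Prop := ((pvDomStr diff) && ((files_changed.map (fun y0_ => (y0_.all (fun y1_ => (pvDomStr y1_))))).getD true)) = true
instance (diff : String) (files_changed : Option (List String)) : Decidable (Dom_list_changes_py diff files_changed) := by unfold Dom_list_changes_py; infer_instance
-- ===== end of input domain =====

-- B replaces A's four per-category filtering comprehensions by tagging each file once,
-- tallying tags in a dict, and emitting messages from a static (tag, format) table; objective: alternative.

-- ===== PORT A =====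
def list_changes_py (diff : String) (files_changed : Option (List String)) : List String :=
  match files_changed with
  | none => ["Code updates"]
  | some fs =>
    if fs = [] then ["Code updates"]
    else
      let backend_files := fs.filter (fun f => PySem.Str.isIn "backend/" f)
      let frontend_files := fs.filter (fun f => PySem.Str.isIn "frontend/" f)
      let test_files := fs.filter (fun f => PySem.Str.isIn "test" (PySem.Str.lower f))
      let doc_files := fs.filter (fun f => PySem.Str.endswith f ".md" || PySem.Str.endswith f ".rst")
      let changes : List String := []
      let changes := if backend_files ≠ [] then changes ++ ["Backend changes in " ++ PySem.Int.toStr backend_files.length ++ " file(s)"] else changes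
      let changes := if frontend_files ≠ [] then changes ++ ["Frontend changes in " ++ PySem.Int.toStr frontend_files.length ++ " file(s)"] else changes
      let changes := if test_files ≠ [] then changes ++ ["Test updates in " ++ PySem.Int.toStr test_files.length ++ " file(s)"] else changes
      let changes := if doc_files ≠ [] then changes ++ ["Documentation updates"] else changes
      if changes = [] then ["Code updates"] else changes

-- ===== PORT B =====
-- _tags: the category tags one file belongs to
def pvTags (f : String) : List String :=
  let t : List String := []
  let t := if PySem.Str.isIn "backend/" f then t ++ ["backend"] else t
  let t := if PySem.Str.isIn "frontend/" f then t ++ ["frontend"] else t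
  let t := if PySem.Str.isIn "test" (PySem.Str.lower f) then t ++ ["test"] else t
  let t := if PySem.Str.endswith f ".md" || PySem.Str.endswith f ".rst" then t ++ ["doc"] else t
  t

-- _TABLE: (tag, message-for-count) pairs; fmt.format(n) ported as the function applied to n
def pvTable : List (String × (Int → String)) :=
  [("backend", fun n => "Backend changes in " ++ PySem.Int.toStr n ++ " file(s)"),
   ("frontend", fun n => "Frontend changes in " ++ PySem.Int.toStr n ++ " file(s)"),
   ("test", fun n => "Test updates in " ++ PySem.Int.toStr n ++ " file(s)")]

def list_changes_py_alt (diff : String) (files_changed : Option (List String)) : List String :=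
  match files_changed with
  | none => ["Code updates"]
  | some fs =>
    if fs = [] then ["Code updates"]
    else
      let counts : PySem.Dict String Int :=
        fs.foldl (fun d f => (pvTags f).foldl (fun d tag => d.insert tag (d.getD tag 0 + 1)) d) PySem.Dict.empty
      let changes : List String :=
        pvTable.foldl (fun ch p => if counts.contains p.1 then ch ++ [p.2 (counts.getD p.1 0)] else ch) []
      let changes := if counts.contains "doc" then changes ++ ["Documentation updates"] else changes
      if changes = [] then ["Code updates"] else changes

-- ===== PRECONDITION & SPEC =====
def Spec_list_changes_py (diff : String) (files_changed : Option (List String)) (out : List String) : Prop := out = list_changes_py_alt diff files_changed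
instance (diff : String) (files_changed : Option (List String)) (out : List String) : Decidable (Spec_list_changes_py diff files_changed out) := by unfold Spec_list_changes_py; infer_instance

-- ===== CLAIM (what is proved, stated in full; the proofs are below) =====
def Claim_equal_list_changes_py : Prop := ∀ (diff : String) (files_changed : Option (List String)), Dom_list_changes_py diff files_changed → Spec_list_changes_py diff files_changed (list_changes_py diff files_changed)

-- ===== LEMMAS AND PROOFS =====

/-- The nested tag-tally loop is the counter of the flattened tag stream. -/
theorem pv_counts_eq_counter (fs : List String) :
    fs.foldl (fun d f => (pvTags f).foldl (fun d tag => d.insert tag (d.getD tag 0 + 1)) d) PySem.Dict.empty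
      = PySem.Dict.counter (fs.flatMap pvTags) := by
  rw [← PySem.Dict.foldl_insert_getD_add_one_eq_counter, List.foldl_flatMap]

/-- Generic: if a tag occurs in pvTags f exactly when p f, counting it over the
    flattened tags counts the files satisfying p. -/
theorem pv_count_tags (p : String → Bool) (t : String)
    (h : ∀ f, (pvTags f).count t = if p f then 1 else 0) (fs : List String) :
    (fs.flatMap pvTags).count t = (fs.filter p).length := by
  induction fs with
  | nil => simp
  | cons x xs ih =>
    rw [List.flatMap_cons, List.count_append, h, List.filter_cons]
    split_ifs <;> simp [ih] <;> omega

theorem pv_tag_backend (f : String) :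
    (pvTags f).count "backend" = if PySem.Str.isIn "backend/" f then 1 else 0 := by
  unfold pvTags; split_ifs <;> decide

theorem pv_tag_frontend (f : String) :
    (pvTags f).count "frontend" = if PySem.Str.isIn "frontend/" f then 1 else 0 := by
  unfold pvTags; split_ifs <;> decide

theorem pv_tag_test (f : String) :
    (pvTags f).count "test" = if PySem.Str.isIn "test" (PySem.Str.lower f) then 1 else 0 := by
  unfold pvTags; split_ifs <;> decide

theorem pv_tag_doc (f : String) :
    (pvTags f).count "doc" = if PySem.Str.endswith f ".md" || PySem.Str.endswith f ".rst" then 1 else 0 := by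
  unfold pvTags; split_ifs <;> decide

/-- Membership of a tag in the flattened stream is non-emptiness of the filter. -/
theorem pv_contains_tags (p : String → Bool) (t : String)
    (h : ∀ f, (pvTags f).count t = if p f then 1 else 0) (fs : List String) :
    (fs.flatMap pvTags).contains t = !(fs.filter p).isEmpty := by
  have hc := pv_count_tags p t h fs
  by_cases hp : fs.filter p = []
  · have : (fs.flatMap pvTags).count t = 0 := by rw [hc, hp]; rfl
    have hnm : t ∉ fs.flatMap pvTags := by
      intro hm; exact absurd this (by simpa using (List.count_pos_iff.mpr hm).ne')
    simp [hp, hnm]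
  · have hlen : 0 < (fs.filter p).length := List.length_pos_iff.mpr hp
    have hm : t ∈ fs.flatMap pvTags := by
      rw [← List.count_pos_iff, hc]; exact hlen
    simp [hp, hm]

-- ===== VERDICT (by name: the statement is the Claim_ definition above) =====
theorem list_changes_py_spec : Claim_equal_list_changes_py := by
  intro diff files_changed _
  unfold Spec_list_changes_py list_changes_py list_changes_py_alt
  match files_changed with
  | none => rfl
  | some fs =>
    by_cases hfs : fs = []
    · simp [hfs]
    · simp only [hfs, if_false, pv_counts_eq_counter, pvTable, List.foldl_cons, List.foldl_nil,
        PySem.Dict.contains_counter, PySem.Dict.getD_counter,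
        pv_contains_tags _ _ pv_tag_backend, pv_count_tags _ _ pv_tag_backend,
        pv_contains_tags _ _ pv_tag_frontend, pv_count_tags _ _ pv_tag_frontend,
        pv_contains_tags _ _ pv_tag_test, pv_count_tags _ _ pv_tag_test,
        pv_contains_tags _ _ pv_tag_doc]
      simp only [Bool.not_eq_eq_eq_not, Bool.not_true, List.isEmpty_eq_false_iff, ne_eq]
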